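-- pv_equiv track=rewrite | github.com/SuperInstance/nexus-swarm | src/swarm/behaviors.py | byzantine_tolerance
-- ===== SOURCE A (Python) =====
-- from typing import List, Dict, Tuple, Optional, Set
--
-- def byzantine_tolerance(votes: Dict[str, str],
--                        max_faulty: int = 0) -> Tuple[Optional[str], bool]:
--     """Detect Byzantine faults — at most f faulty out of 3f+1."""
--     n = len(votes)
--     f_max = (n - 1) // 3
--     if max_faulty > 0:
--         f_max = min(f_max, max_faulty)
--
--     counts: Dict[str, int] = {}
--     for vote in votes.values():
--         counts[vote] = counts.get(vote, 0) + 1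
--
--     if not counts:
--         return (None, False)
--
--     # Correct nodes must agree; faulty can be anything
--     non_faulty = n - f_max
--     for val, count in counts.items():
--         if count >= non_faulty:
--             return (val, True)
--     return (None, False)
-- ===== SOURCE B (Python) =====
-- from typing import Dict, Tuple, Optional
--
-- def byzantine_tolerance(votes: Dict[str, str],
--                         max_faulty: int = 0) -> Tuple[Optional[str], bool]:
--     """One-pass variant: track the running argmax while tallying, then make a
--     single threshold decision (safe because the threshold exceeds n/2, so at
--     most one value can ever qualify)."""
--     n = len(votes)
--     f_max = (n - 1) // 3
--     if max_faulty > 0: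
--         f_max = min(f_max, max_faulty)
--
--     counts: Dict[str, int] = {}
--     best: Optional[str] = None
--     best_count = 0
--     for vote in votes.values():
--         c = counts.get(vote, 0) + 1
--         counts[vote] = c
--         if c > best_count:
--             best, best_count = vote, c
--
--     if best is not None and best_count >= n - f_max:
--         return (best, True)
--     return (None, False)
-- ===== Notes on version B (the rewrite author's own statement) =====
-- stated objective: alternative
-- what changed: Replaces the build-table-then-scan-distinct-values-for-a-qualifier structure with a single pass that maintains the running argmax while tallying, followed by one threshold test; correct because the threshold n - f_max exceeds n/2, so at most one value can qualify and it must be the argmax.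
import Mathlib
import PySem

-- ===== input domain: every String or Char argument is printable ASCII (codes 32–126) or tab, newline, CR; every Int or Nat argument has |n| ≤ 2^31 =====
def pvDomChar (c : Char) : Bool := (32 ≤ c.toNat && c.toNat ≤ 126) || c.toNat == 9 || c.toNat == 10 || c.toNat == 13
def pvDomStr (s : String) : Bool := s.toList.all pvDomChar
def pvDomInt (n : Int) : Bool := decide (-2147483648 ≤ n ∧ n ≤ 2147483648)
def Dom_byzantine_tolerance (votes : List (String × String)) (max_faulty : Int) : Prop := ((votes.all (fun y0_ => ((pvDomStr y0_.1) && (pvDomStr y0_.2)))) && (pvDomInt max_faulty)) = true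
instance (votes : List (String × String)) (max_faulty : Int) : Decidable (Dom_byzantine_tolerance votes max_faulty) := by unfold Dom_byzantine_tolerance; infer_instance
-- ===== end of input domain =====

-- B replaces A's build-tally-then-scan-distinct-values structure with a single pass that
-- tracks the running argmax while tallying, then makes one threshold decision (alternative
-- decomposition, same cost; correct because the threshold exceeds n/2).

-- ===== PORT A =====
def byzantine_tolerance (votes : List (String × String)) (max_faulty : Int) : Option String × Bool :=
  let n : Int := votes.length
  let f_max0 : Int := PySem.Int.floordiv (n - 1) 3
  let f_max : Int := if max_faulty > 0 then min f_max0 max_faulty else f_max0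
  let counts : PySem.Dict String Int :=
    votes.foldl (fun d p => d.insert p.2 (d.getD p.2 0 + 1)) PySem.Dict.empty
  if counts.items = [] then (none, false)
  else
    let non_faulty : Int := n - f_max
    match counts.items.find? (fun p => decide (p.2 ≥ non_faulty)) with
    | some p => (some p.1, true)
    | none => (none, false)

-- ===== PORT B =====
-- one loop step of B: update the tally and, if this vote's new count beats the running
-- maximum, move the argmax to it
def bstep (st : PySem.Dict String Int × Option String × Int) (x : String) :
    PySem.Dict String Int × Option String × Int :=
  let c := st.1.getD x 0 + 1
  (st.1.insert x c, if c > st.2.2 then (some x, c) else st.2)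

def byzantine_tolerance_alt (votes : List (String × String)) (max_faulty : Int) : Option String × Bool :=
  let n : Int := votes.length
  let f_max0 : Int := PySem.Int.floordiv (n - 1) 3
  let f_max : Int := if max_faulty > 0 then min f_max0 max_faulty else f_max0
  let st := votes.foldl (fun st p => bstep st p.2) (PySem.Dict.empty, none, 0)
  match st.2.1 with
  | some best => if st.2.2 ≥ n - f_max then (some best, true) else (none, false)
  | none => (none, false)

-- ===== PRECONDITION & SPEC =====
def Spec_byzantine_tolerance (votes : List (String × String)) (max_faulty : Int) (out : Option String × Bool) : Prop := out = byzantine_tolerance_alt votes max_faulty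
instance (votes : List (String × String)) (max_faulty : Int) (out : Option String × Bool) : Decidable (Spec_byzantine_tolerance votes max_faulty out) := by unfold Spec_byzantine_tolerance; infer_instance

-- ===== CLAIM (what is proved, stated in full; the proofs are below) =====
def Claim_equal_byzantine_tolerance : Prop := ∀ (votes : List (String × String)) (max_faulty : Int), Dom_byzantine_tolerance votes max_faulty → Spec_byzantine_tolerance votes max_faulty (byzantine_tolerance votes max_faulty)

-- ===== LEMMAS AND PROOFS =====

-- two distinct values cannot together out-count the list
lemma count_two_le_length (l : List String) (v w : String) (h : v ≠ w) :
    l.count v + l.count w ≤ l.length := by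
  induction l with
  | nil => simp
  | cons x xs ih =>
    simp only [List.count_cons, List.length_cons]
    by_cases hv : x = v <;> by_cases hw : x = w <;> simp_all <;> omega

-- whatever f_max A computes, 2 * f_max < n when n ≥ 1
lemma fmax_lt (n mf : Int) (hn : 1 ≤ n) :
    2 * (if mf > 0 then min (PySem.Int.floordiv (n - 1) 3) mf
         else PySem.Int.floordiv (n - 1) 3) < n := by
  have h : PySem.Int.floordiv (n - 1) 3 = (n - 1) / 3 :=
    PySem.Int.floordiv_eq_ediv_of_pos (by norm_num)
  split_ifs <;> rw [h] <;> omega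

-- appending one element to the tallied list is one insert on the tally
lemma counter_concat (l : List String) (x : String) :
    PySem.Dict.counter (l ++ [x]) =
      (PySem.Dict.counter l).insert x ((PySem.Dict.counter l).getD x 0 + 1) := by
  rw [← PySem.Dict.foldl_insert_getD_add_one_eq_counter,
      ← PySem.Dict.foldl_insert_getD_add_one_eq_counter, List.foldl_append]
  simp

-- invariant of B's loop: the first component is the tally of the processed list and, once
-- the list is nonempty, the second is an argmax together with its (maximal) count
lemma bfold_spec (l : List String) :
    (l.foldl bstep (PySem.Dict.empty, none, (0 : Int))).1 = PySem.Dict.counter l ∧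
    ((l = [] ∧ (l.foldl bstep (PySem.Dict.empty, none, (0 : Int))).2 = (none, 0)) ∨
     (∃ b, (l.foldl bstep (PySem.Dict.empty, none, (0 : Int))).2.1 = some b ∧
        (l.foldl bstep (PySem.Dict.empty, none, (0 : Int))).2.2 = (l.count b : Int) ∧
        ∀ v, (l.count v : Int) ≤ (l.foldl bstep (PySem.Dict.empty, none, (0 : Int))).2.2)) := by
  induction l using List.reverseRecOn with
  | nil => simp [PySem.Dict.counter]
  | append_singleton l x ih =>
    obtain ⟨hd, hb⟩ := ih
    rw [List.foldl_append] at *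
    simp only [List.foldl_cons, List.foldl_nil]
    set st := l.foldl bstep (PySem.Dict.empty, none, (0 : Int)) with hst
    clear_value st
    have hc : st.1.getD x 0 = (l.count x : Int) := by
      rw [hd, PySem.Dict.getD_counter]
    simp only [bstep, hc]
    have hcnt : ∀ v : String, (l ++ [x]).count v = l.count v + if x = v then 1 else 0 := by
      intro v; simp [List.count_append, List.count_singleton]
    constructor
    · rw [counter_concat, hd, PySem.Dict.getD_counter]
    · right
      rcases hb with ⟨hnil, h2⟩ | ⟨b, hb1, hb2, hmax⟩
      · subst hnil
        rw [h2]
        refine ⟨x, by norm_num, by norm_num [hcnt], ?_⟩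
        intro v
        norm_num
        by_cases hv : x = v <;> simp [hv, List.count_eq_zero_of_not_mem]
      · by_cases hgt : (l.count x : Int) + 1 > st.2.2
        · rw [if_pos hgt]
          refine ⟨x, rfl, ?_, ?_⟩
          · rw [hcnt x]; simp
          · intro v; rw [hcnt v]
            have := hmax v
            by_cases hv : x = v
            · subst hv; simp
            · simp only [if_neg hv]
              push_cast at *
              omega
        · rw [if_neg hgt]
          have hbx : x ≠ b := by
            intro h; subst h
            rw [hb2] at hgt; omega
          refine ⟨b, hb1, ?_, ?_⟩
          · rw [hcnt b, if_neg hbx]; simp [hb2]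
          · intro v; rw [hcnt v]
            have := hmax v
            by_cases hv : x = v
            · subst hv; rw [if_pos rfl]
              rw [hb2] at hgt ⊢
              have := hmax x
              push_cast at *
              omega
            · simp only [if_neg hv]
              omega

-- the two ports agree on every input
lemma ports_agree (votes : List (String × String)) (mf : Int) :
    byzantine_tolerance votes mf = byzantine_tolerance_alt votes mf := by
  by_cases hvn : votes = []
  · subst hvn; simp [byzantine_tolerance, byzantine_tolerance_alt, PySem.Dict.empty]
  · simp only [byzantine_tolerance, byzantine_tolerance_alt]
    have hfoldA : votes.foldl (fun d p => d.insert p.2 (d.getD p.2 0 + 1)) PySem.Dict.empty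
        = PySem.Dict.counter (votes.map (·.2)) := by
      rw [← PySem.Dict.foldl_insert_getD_add_one_eq_counter, List.foldl_map]
    have hfoldB : votes.foldl (fun st p => bstep st p.2) (PySem.Dict.empty, none, (0:Int))
        = (votes.map (·.2)).foldl bstep (PySem.Dict.empty, none, (0:Int)) := by
      rw [List.foldl_map]
    rw [hfoldA, hfoldB]
    set vals : List String := votes.map (·.2) with hvals
    have hvne : vals ≠ [] := by
      simp [hvals, hvn]
    obtain ⟨hd1, hb⟩ := bfold_spec vals
    rcases hb with ⟨h0, _⟩ | ⟨b, hb1, hb2, hmax⟩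
    · exact absurd h0 hvne
    obtain ⟨y, ys, hy⟩ := List.exists_cons_of_ne_nil hvne
    have hymem : y ∈ vals := by rw [hy]; exact List.mem_cons_self
    have hitems : (PySem.Dict.counter vals).items
        = (PySem.Set.ofList vals).map (fun k => (k, (vals.count k : Int))) :=
      PySem.Dict.items_counter vals
    have hsetne : (PySem.Set.ofList vals : List String) ≠ [] := by
      have : y ∈ (PySem.Set.ofList vals : List String) := by
        rw [PySem.Set.mem_ofList]; exact hymem
      exact List.ne_nil_of_mem this
    have hine : (PySem.Dict.counter vals).items ≠ [] := by
      rw [hitems]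
      simpa using hsetne
    rw [if_neg (by exact fun h => hine h)]
    rw [hb1]
    set fm : Int := (if mf > 0 then min (PySem.Int.floordiv ((votes.length : Int) - 1) 3) mf
        else PySem.Int.floordiv ((votes.length : Int) - 1) 3) with hfm
    have hn1 : 1 ≤ (votes.length : Int) := by
      cases votes with
      | nil => exact absurd rfl hvn
      | cons a l => simp
    have hfl : 2 * fm < (votes.length : Int) := fmax_lt _ mf hn1
    have hlen : vals.length = votes.length := by
      rw [hvals, List.length_map]
    cases hf : List.find? (fun p => decide (p.2 ≥ (votes.length : Int) - fm))
        (PySem.Dict.counter vals).items with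
    | none =>
      have hallnot := List.find?_eq_none.mp hf
      have hy1 : 0 < vals.count y := List.count_pos_iff.mpr hymem
      have hbv : 0 < vals.count b := by
        have h1 := hmax y
        rw [hb2] at h1
        omega
      have hbmem : b ∈ (PySem.Set.ofList vals : List String) := by
        rw [PySem.Set.mem_ofList]
        exact List.count_pos_iff.mp hbv
      have hitem : (b, (vals.count b : Int)) ∈ (PySem.Dict.counter vals).items := by
        rw [hitems]
        exact List.mem_map_of_mem hbmem
      have hlt := hallnot _ hitem
      simp only [decide_eq_true_eq, ge_iff_le, not_le] at hlt
      rw [hb2]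
      have hnot : ¬ ((vals.count b : Int) ≥ (votes.length : Int) - fm) := by
        omega
      simp [hnot]
    | some p =>
      have hpmem := List.mem_of_find?_eq_some hf
      have hppred := List.find?_some hf
      rw [hitems] at hpmem
      obtain ⟨k, hkmem, hpk⟩ := List.mem_map.mp hpmem
      rw [← hpk] at hppred
      simp only [decide_eq_true_eq, ge_iff_le] at hppred
      have hkvals : k ∈ vals := (PySem.Set.mem_ofList _ _).mp hkmem
      have hbk : b = k := by
        by_contra hne
        have h2 := count_two_le_length vals b k hne
        have h3 := hmax k
        rw [hb2] at h3
        rw [hlen] at h2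
        push_cast at *
        omega
      rw [hb2, hbk]
      simp [hppred, ← hpk]

-- ===== VERDICT (by name: the statement is the Claim_ definition above) =====
theorem byzantine_tolerance_spec : Claim_equal_byzantine_tolerance := by
  intro votes max_faulty _
  unfold Spec_byzantine_tolerance
  exact ports_agree votes max_faulty
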